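-- pv_equiv track=rewrite | github.com/matthew-lottly/geoprompt | src/geoprompt/performance.py | fair_scheduling_across_tenants
-- ===== SOURCE A (Python) =====
-- from collections import defaultdict, deque
-- from typing import Any, Callable, Iterable, Sequence
--
-- def fair_scheduling_across_tenants(jobs: Sequence[dict[str, Any]]) -> dict[str, Any]:
--     """Interleave tenant work in a fair schedule."""
--     groups: dict[str, deque[dict[str, Any]]] = defaultdict(deque)
--     for job in jobs:
--         groups[str(job.get("tenant", "default"))].append(dict(job))
--     schedule: list[dict[str, Any]] = []
--     while any(groups.values()):
--         for tenant in sorted(groups):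
--             if groups[tenant]:
--                 schedule.append(groups[tenant].popleft())
--     return {"schedule": schedule}
-- ===== SOURCE B (Python) =====
-- def fair_scheduling_across_tenants(jobs):
--     """Interleave tenant work in a fair schedule (round-index version: sort keys once)."""
--     groups = {}
--     for job in jobs:
--         groups.setdefault(str(job.get("tenant", "default")), []).append(dict(job))
--     ordered = [groups[t] for t in sorted(groups)]
--     rounds = max(map(len, ordered), default=0)
--     schedule = [g[i] for i in range(rounds) for g in ordered if i < len(g)]
--     return {"schedule": schedule}
-- ===== Notes on version B (the rewrite author's own statement) =====
-- stated objective: alternative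
-- what changed: A builds per-tenant deques and then runs a while-loop that re-sorts the tenant keys and rescans every queue on each round, popping heads; B sorts the keys once and builds the schedule by a round-index comprehension (round i takes the i-th job of each tenant group).
import Mathlib
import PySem

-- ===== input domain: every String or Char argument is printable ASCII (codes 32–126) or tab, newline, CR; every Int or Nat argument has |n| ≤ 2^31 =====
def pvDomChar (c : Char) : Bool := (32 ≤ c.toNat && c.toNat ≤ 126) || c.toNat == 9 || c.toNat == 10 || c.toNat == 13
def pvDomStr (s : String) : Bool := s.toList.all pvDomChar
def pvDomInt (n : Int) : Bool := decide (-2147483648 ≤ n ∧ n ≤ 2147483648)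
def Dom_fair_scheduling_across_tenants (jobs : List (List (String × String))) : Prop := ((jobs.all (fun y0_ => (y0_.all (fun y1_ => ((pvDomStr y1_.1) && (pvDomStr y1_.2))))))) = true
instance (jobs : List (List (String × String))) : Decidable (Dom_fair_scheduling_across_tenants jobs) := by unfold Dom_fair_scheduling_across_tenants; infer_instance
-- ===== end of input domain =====

-- B replaces A's scheduling loop (which re-sorts the tenant keys and rescans every queue on each
-- round) by a single key sort followed by a round-index comprehension (round i takes job i of each group).

-- ===== PORT A =====
-- total number of queued jobs in the groups dict: the while-loop's termination measure
def pvTotal (g : PySem.Dict String (List (List (String × String)))) : Nat :=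
  (g.values.map List.length).sum

-- one pass of A's 'for tenant in sorted(groups): if groups[tenant]: schedule.append(popleft())',
-- threading the (schedule, groups) state through the key list
def pvPassA (ks : List String)
    (p : List (List (String × String)) × PySem.Dict String (List (List (String × String)))) :
    List (List (String × String)) × PySem.Dict String (List (List (String × String))) :=
  ks.foldl (fun p t =>
    match p.2.getD t [] with
    | [] => p
    | j :: rest => (p.1 ++ [j], p.2.insert t rest))
    p

-- the pass pops exactly the head of each listed key's queue and leaves the key list unchanged
-- (needed by pvLoopA's termination proof, hence stated before the port)
theorem pvPassA_spec (ks : List String)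
    (g : PySem.Dict String (List (List (String × String)))) (s : List (List (String × String)))
    (hks : ks.Nodup) :
    (pvPassA ks (s, g)).1 = s ++ ks.filterMap (fun t => (g.getD t []).head?)
    ∧ (pvPassA ks (s, g)).2.keys = g.keys
    ∧ ∀ t, (pvPassA ks (s, g)).2.getD t [] =
        if t ∈ ks then (g.getD t []).tail else g.getD t [] := by
  induction ks generalizing g s with
  | nil => simp [pvPassA]
  | cons t0 ks ih =>
    have hnd : ks.Nodup := hks.of_cons
    have ht0 : t0 ∉ ks := (List.nodup_cons.mp hks).1
    cases hg : g.getD t0 [] with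
    | nil =>
      have hstep : pvPassA (t0 :: ks) (s, g) = pvPassA ks (s, g) := by
        simp [pvPassA, hg]
      obtain ⟨h1, h2, h3⟩ := ih g s hnd
      refine ⟨?_, by rw [hstep]; exact h2, ?_⟩
      · rw [hstep, h1, List.filterMap_cons]
        simp [hg]
      · intro t
        rw [hstep, h3 t]
        by_cases htt : t = t0
        · subst htt; simp [ht0, hg]
        · simp [htt]
    | cons j rest =>
      have hcont : g.contains t0 = true := by
        by_contra hc
        have : g.getD t0 [] = [] :=
          PySem.Dict.getD_of_not_contains _ _ (by simpa using hc)
        simp [hg] at this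
      have hstep : pvPassA (t0 :: ks) (s, g) = pvPassA ks (s ++ [j], g.insert t0 rest) := by
        simp [pvPassA, hg]
      obtain ⟨h1, h2, h3⟩ := ih (g.insert t0 rest) (s ++ [j]) hnd
      refine ⟨?_, ?_, ?_⟩
      · rw [hstep, h1]
        have hcongr : ks.filterMap (fun t => ((g.insert t0 rest).getD t []).head?)
            = ks.filterMap (fun t => (g.getD t []).head?) := by
          apply List.filterMap_congr
          intro t ht
          have hne : t ≠ t0 := fun h => ht0 (h ▸ ht)
          rw [PySem.Dict.getD_insert]
          simp [hne]
        rw [hcongr, List.filterMap_cons]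
        simp [hg]
      · rw [hstep, h2, PySem.Dict.keys_insert_of_contains _ _ hcont]
      · intro t
        rw [hstep, h3 t]
        by_cases htt : t = t0
        · subst htt; simp [ht0, hg]
        · simp [PySem.Dict.getD_insert, htt]

-- while some queue is nonempty, one pass strictly shrinks the total
theorem pvPassA_decreases (g : PySem.Dict String (List (List (String × String))))
    (hnd : g.keys.Nodup) (hc : g.values.any (fun q => !q.isEmpty) = true)
    (s : List (List (String × String))) :
    pvTotal (pvPassA (PySem.List.sorted g.keys (fun k => k) false) (s, g)).2 < pvTotal g := by
  have hks : (PySem.List.sorted g.keys (fun k => k) false).Nodup :=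
    ((PySem.List.sorted_perm g.keys (fun k => k) false).symm).nodup hnd
  obtain ⟨h1, h2, h3⟩ := pvPassA_spec (PySem.List.sorted g.keys (fun k => k) false) g s hks
  have hnd' : (pvPassA (PySem.List.sorted g.keys (fun k => k) false) (s, g)).2.keys.Nodup := by
    rw [h2]; exact hnd
  unfold pvTotal
  rw [PySem.Dict.values_eq_map_keys _ hnd' [], h2, List.map_map,
      PySem.Dict.values_eq_map_keys _ hnd [], List.map_map]
  apply List.sum_lt_sum
  · intro t ht
    simp only [Function.comp]
    rw [h3 t, if_pos ((PySem.List.mem_sorted _ _ _ _).mpr ht)]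
    simp [List.length_tail]
  · obtain ⟨q, hq, hqne⟩ := List.any_eq_true.mp hc
    obtain ⟨⟨k, v⟩, hmem, hk⟩ := List.mem_map.mp hq
    cases hk
    refine ⟨k, List.mem_map.mpr ⟨(k, v), hmem, rfl⟩, ?_⟩
    simp only [Function.comp]
    have hmk : k ∈ PySem.List.sorted g.keys (fun k => k) false :=
      (PySem.List.mem_sorted _ _ _ _).mpr (List.mem_map.mpr ⟨(k, v), hmem, rfl⟩)
    rw [h3 k, if_pos hmk, PySem.Dict.getD_of_mem_items _ hmem hnd []]
    cases v with
    | nil => simp at hqne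
    | cons a l => simp

-- A's 'while any(groups.values()):' loop (carries the keys-Nodup invariant of the dict built below)
def pvLoopA (g : PySem.Dict String (List (List (String × String))))
    (sched : List (List (String × String))) (hnd : g.keys.Nodup) :
    List (List (String × String)) :=
  if hc : g.values.any (fun q => !q.isEmpty) = true then
    pvLoopA (pvPassA (PySem.List.sorted g.keys (fun k => k) false) (sched, g)).2
      (pvPassA (PySem.List.sorted g.keys (fun k => k) false) (sched, g)).1
      (by
        rw [(pvPassA_spec (PySem.List.sorted g.keys (fun k => k) false) g sched
          (((PySem.List.sorted_perm g.keys (fun k => k) false).symm).nodup hnd)).2.1]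
        exact hnd)
  else sched
termination_by pvTotal g
decreasing_by exact pvPassA_decreases g hnd hc sched

def fair_scheduling_across_tenants (jobs : List (List (String × String))) :
    List (String × List (List (String × String))) :=
  let g := jobs.foldl (fun g job =>
      g.modify ((PySem.Dict.ofList job).getD "tenant" "default") []
        (fun q => q ++ [(PySem.Dict.ofList job).items])) PySem.Dict.empty
  [("schedule", pvLoopA g []
      (PySem.Dict.nodup_keys_foldl_modify_key jobs _ [] _ PySem.Dict.empty PySem.Dict.nodup_keys_empty))]

-- ===== PORT B =====
def fair_scheduling_across_tenants_alt (jobs : List (List (String × String))) :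
    List (String × List (List (String × String))) :=
  let g := jobs.foldl (fun g job =>
      let t := (PySem.Dict.ofList job).getD "tenant" "default"
      g.insert t (g.getD t [] ++ [(PySem.Dict.ofList job).items])) PySem.Dict.empty
  let ordered := (PySem.List.sorted g.keys (fun k => k) false).map (fun t => g.getD t [])
  let rounds := PySem.List.maxD (ordered.map (fun q => (q.length : Int))) (fun x => x) 0
  let schedule := (PySem.List.pyRange 0 rounds 1).flatMap (fun i =>
      ordered.filterMap (fun q => PySem.List.pyGet? q i))
  [("schedule", schedule)]

-- ===== PRECONDITION & SPEC =====
def Spec_fair_scheduling_across_tenants (jobs : List (List (String × String))) (out : List (String × List (List (String × String)))) : Prop := out = fair_scheduling_across_tenants_alt jobs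
instance (jobs : List (List (String × String))) (out : List (String × List (List (String × String)))) : Decidable (Spec_fair_scheduling_across_tenants jobs out) := by unfold Spec_fair_scheduling_across_tenants; infer_instance

-- ===== CLAIM (what is proved, stated in full; the proofs are below) =====
def Claim_equal_fair_scheduling_across_tenants : Prop := ∀ (jobs : List (List (String × String))), Dom_fair_scheduling_across_tenants jobs → Spec_fair_scheduling_across_tenants jobs (fair_scheduling_across_tenants jobs)

-- ===== LEMMAS AND PROOFS =====

-- with unique keys, every key's queue is one of the dict's values and vice versa
theorem pvGetD_mem_values (g : PySem.Dict String (List (List (String × String))))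
    (hnd : g.keys.Nodup) (t : String) (ht : t ∈ g.keys) : g.getD t [] ∈ g.values := by
  obtain ⟨⟨k, v⟩, hmem, hk⟩ := List.mem_map.mp ht
  cases hk
  rw [PySem.Dict.getD_of_mem_items _ hmem hnd []]
  exact List.mem_map.mpr ⟨(k, v), hmem, rfl⟩

theorem pvValue_getD (g : PySem.Dict String (List (List (String × String))))
    (hnd : g.keys.Nodup) (q : List (List (String × String))) (hq : q ∈ g.values) :
    ∃ t ∈ g.keys, g.getD t [] = q := by
  obtain ⟨⟨k, v⟩, hmem, hk⟩ := List.mem_map.mp hq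
  cases hk
  exact ⟨k, List.mem_map.mpr ⟨(k, v), hmem, rfl⟩, PySem.Dict.getD_of_mem_items _ hmem hnd []⟩

-- round-robin specification: emit the heads of all queues, recurse on the tails
def pvRR (ls : List (List (List (String × String)))) : List (List (String × String)) :=
  if ls.all (fun q => q.isEmpty) = true then [] else
    ls.filterMap List.head? ++ pvRR (ls.map List.tail)
termination_by (ls.map List.length).sum
decreasing_by
  rename_i h
  have e : (List.map (List.length ∘ fun x : {x // x ∈ ls} => x.val.tail) ls.attach).sum
      = (ls.map (fun q => q.tail.length)).sum := by simp
  rw [List.map_map, e]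
  apply List.sum_lt_sum
  · intro q _
    simp [List.length_tail]
  · simp only [List.all_eq_true] at h
    push Not at h
    obtain ⟨q, hq, hne⟩ := h
    exact ⟨q, hq, by cases q with | nil => simp at hne | cons a l => simp⟩

-- A's loop produces the round-robin of the sorted-key queues
theorem pvLoopA_eq (n : Nat) :
    ∀ (g : PySem.Dict String (List (List (String × String))))
      (s : List (List (String × String))) (hnd : g.keys.Nodup), pvTotal g ≤ n →
      pvLoopA g s hnd =
        s ++ pvRR ((PySem.List.sorted g.keys (fun k => k) false).map (fun t => g.getD t [])) := by
  induction n with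
  | zero =>
    intro g s hnd hle
    rw [pvLoopA]
    by_cases hc : g.values.any (fun q => !q.isEmpty) = true
    · exact absurd (Nat.lt_of_lt_of_le (pvPassA_decreases g hnd hc s) hle) (Nat.not_lt_zero _)
    · rw [dif_neg hc]
      have hall : ((PySem.List.sorted g.keys (fun k => k) false).map
          (fun t => g.getD t [])).all (fun q => q.isEmpty) = true := by
        simp only [List.all_eq_true]
        intro q hq
        obtain ⟨t, ht, hqt⟩ := List.mem_map.mp hq
        have hv := pvGetD_mem_values g hnd t ((PySem.List.mem_sorted _ _ _ _).mp ht)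
        rw [← hqt]
        by_contra hne
        exact hc (List.any_eq_true.mpr ⟨_, hv, by simpa using hne⟩)
      rw [pvRR, if_pos hall, List.append_nil]
  | succ n ih =>
    intro g s hnd hle
    rw [pvLoopA]
    by_cases hc : g.values.any (fun q => !q.isEmpty) = true
    · rw [dif_pos hc]
      have hks : (PySem.List.sorted g.keys (fun k => k) false).Nodup :=
        ((PySem.List.sorted_perm g.keys (fun k => k) false).symm).nodup hnd
      obtain ⟨h1, h2, h3⟩ := pvPassA_spec (PySem.List.sorted g.keys (fun k => k) false) g s hks
      have hle' : pvTotal (pvPassA (PySem.List.sorted g.keys (fun k => k) false) (s, g)).2 ≤ n :=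
        Nat.le_of_lt_succ (Nat.lt_of_lt_of_le (pvPassA_decreases g hnd hc s) hle)
      rw [ih _ _ _ hle', h1]
      have hkeq : PySem.List.sorted
          (pvPassA (PySem.List.sorted g.keys (fun k => k) false) (s, g)).2.keys (fun k => k) false
          = PySem.List.sorted g.keys (fun k => k) false := by rw [h2]
      rw [hkeq]
      have hmap : (PySem.List.sorted g.keys (fun k => k) false).map
            (fun t => (pvPassA (PySem.List.sorted g.keys (fun k => k) false) (s, g)).2.getD t [])
          = ((PySem.List.sorted g.keys (fun k => k) false).map (fun t => g.getD t [])).map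
              List.tail := by
        rw [List.map_map]
        apply List.map_congr_left
        intro t ht
        rw [h3 t, if_pos ht]
        rfl
      rw [hmap]
      have hna : ¬ ((PySem.List.sorted g.keys (fun k => k) false).map
          (fun t => g.getD t [])).all (fun q => q.isEmpty) = true := by
        obtain ⟨q, hq, hqne⟩ := List.any_eq_true.mp hc
        obtain ⟨t, htk, hgt⟩ := pvValue_getD g hnd q hq
        simp only [List.all_eq_true]
        push Not
        refine ⟨q, List.mem_map.mpr ⟨t, (PySem.List.mem_sorted _ _ _ _).mpr htk, hgt⟩, ?_⟩
        simpa using hqne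
      conv_rhs => rw [pvRR, if_neg hna]
      rw [List.filterMap_map, List.append_assoc]
      rfl
    · rw [dif_neg hc]
      have hall : ((PySem.List.sorted g.keys (fun k => k) false).map
          (fun t => g.getD t [])).all (fun q => q.isEmpty) = true := by
        simp only [List.all_eq_true]
        intro q hq
        obtain ⟨t, ht, hqt⟩ := List.mem_map.mp hq
        have hv := pvGetD_mem_values g hnd t ((PySem.List.mem_sorted _ _ _ _).mp ht)
        rw [← hqt]
        by_contra hne
        exact hc (List.any_eq_true.mpr ⟨_, hv, by simpa using hne⟩)
      rw [pvRR, if_pos hall, List.append_nil]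

-- indexing through the tail
theorem pvGet_tail {α : Type} (l : List α) (n : Nat) : l.tail[n]? = l[n + 1]? := by
  cases l <;> rfl

-- B's round-index comprehension produces the round-robin, for any sufficient round count
theorem pvRowsEq (M : Nat) :
    ∀ ls : List (List (List (String × String))), (∀ q ∈ ls, q.length ≤ M) →
      (List.range M).flatMap (fun i => ls.filterMap (fun q => q[i]?)) = pvRR ls := by
  induction M with
  | zero =>
    intro ls hb
    have hall : ls.all (fun q => q.isEmpty) = true := by
      simp only [List.all_eq_true]
      intro q hq
      have := hb q hq
      simp [List.eq_nil_of_length_eq_zero (Nat.le_zero.mp this)]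
    rw [pvRR, if_pos hall]
    simp
  | succ M ih =>
    intro ls hb
    by_cases hall : ls.all (fun q => q.isEmpty) = true
    · rw [pvRR, if_pos hall]
      apply List.flatMap_eq_nil_iff.mpr
      intro i _
      apply List.filterMap_eq_nil_iff.mpr
      intro q hq
      have : q = [] := by
        have := List.all_eq_true.mp hall q hq
        simpa [List.isEmpty_iff] using this
      simp [this]
    · rw [List.range_succ_eq_map, List.flatMap_cons, List.flatMap_map]
      have hrow0 : ls.filterMap (fun q => q[0]?) = ls.filterMap List.head? := by
        apply List.filterMap_congr
        intro q _
        cases q <;> rfl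
      have hrows : (fun i => ls.filterMap (fun q => q[Nat.succ i]?))
          = fun i => (ls.map List.tail).filterMap (fun q => q[i]?) := by
        funext i
        rw [List.filterMap_map]
        apply List.filterMap_congr
        intro q _
        simp only [Function.comp]
        rw [pvGet_tail]
      rw [hrow0, hrows, ih (ls.map List.tail) ?bound]
      · conv_rhs => rw [pvRR, if_neg hall]
      case bound =>
        intro q hq
        obtain ⟨q', hq', rfl⟩ := List.mem_map.mp hq
        have := hb q' hq'
        simp only [List.length_tail]
        omega

-- max(..., default=0) of the lengths is a nonnegative upper bound of the lengths
theorem pvMaxD_spec (ls : List (List (List (String × String)))) :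
    0 ≤ PySem.List.maxD (ls.map (fun q => (q.length : Int))) (fun x => x) 0
    ∧ ∀ q ∈ ls, (q.length : Int)
        ≤ PySem.List.maxD (ls.map (fun q => (q.length : Int))) (fun x => x) 0 := by
  have hdef : PySem.List.maxD (ls.map (fun q => (q.length : Int))) (fun x => x) 0
      = (PySem.List.max? (ls.map (fun q => (q.length : Int))) (fun x => x)).getD 0 := rfl
  cases hm : PySem.List.max? (ls.map (fun q => (q.length : Int))) (fun x => x) with
  | none =>
    have hnil : ls = [] :=
      List.map_eq_nil_iff.mp ((PySem.List.max?_eq_none_iff _ _).mp hm)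
    subst hnil
    refine ⟨by rw [hdef, hm]; simp, by intro q hq; simp at hq⟩
  | some m =>
    obtain ⟨q0, _, hq0⟩ := List.mem_map.mp (PySem.List.max?_mem hm)
    refine ⟨?_, ?_⟩
    · rw [hdef, hm, Option.getD_some, ← hq0]
      exact Int.natCast_nonneg _
    · intro q hq
      rw [hdef, hm, Option.getD_some]
      exact PySem.List.max?_isMax hm _ (List.mem_map.mpr ⟨q, hq, rfl⟩)

-- ===== VERDICT (by name: the statement is the Claim_ definition above) =====
theorem fair_scheduling_across_tenants_spec : Claim_equal_fair_scheduling_across_tenants := by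
  intro jobs _hdom
  unfold Spec_fair_scheduling_across_tenants
  unfold fair_scheduling_across_tenants fair_scheduling_across_tenants_alt
  refine congrArg (fun x => [("schedule", x)]) ?_
  -- general form over any groups dict with unique keys; B's grouping fold is definitionally A's
  have key : ∀ (G : PySem.Dict String (List (List (String × String)))) (hnd : G.keys.Nodup),
      pvLoopA G [] hnd =
        (PySem.List.pyRange 0
            (PySem.List.maxD
              (((PySem.List.sorted G.keys (fun k => k) false).map (fun t => G.getD t [])).map
                (fun q => (q.length : Int))) (fun x => x) 0) 1).flatMap
          (fun i =>
            ((PySem.List.sorted G.keys (fun k => k) false).map (fun t => G.getD t [])).filterMap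
              (fun q => PySem.List.pyGet? q i)) := by
    intro G hnd
    set ls := (PySem.List.sorted G.keys (fun k => k) false).map (fun t => G.getD t []) with hls
    obtain ⟨hnn, hub⟩ := pvMaxD_spec ls
    set rounds := PySem.List.maxD (ls.map (fun q => (q.length : Int))) (fun x => x) 0 with hr
    rw [pvLoopA_eq (pvTotal G) G [] hnd le_rfl, List.nil_append]
    rw [show rounds = ((rounds.toNat : Nat) : Int) from (Int.toNat_of_nonneg hnn).symm,
        PySem.List.pyRange_zero_natCast, List.flatMap_map]
    simp only [PySem.List.pyGet?_natCast]
    rw [pvRowsEq rounds.toNat ls ?_]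
    intro q hq
    have := hub q hq
    omega
  exact key _ (PySem.Dict.nodup_keys_foldl_modify_key jobs _ [] _ PySem.Dict.empty
    PySem.Dict.nodup_keys_empty)
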